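-- pv_equiv track=rewrite | github.com/Yodchai5556/bg | camera2.py | times
-- ===== SOURCE A (Python) =====
-- def times(s_time,e_time):
--     i=0
--     if(s_time>=56):
--         e_time=e_time+(61-s_time);
--         s_time=0
--     while(s_time<e_time):
--
--         i=i+1
--         s_time=s_time+1
--     return i
-- ===== SOURCE B (Python) =====
-- def times(s_time, e_time):
--     # closed form: after the >=56 adjustment, the loop counts max(0, e_time - s_time)
--     if s_time >= 56:
--         e_time = e_time + (61 - s_time)
--         s_time = 0
--     return max(0, e_time - s_time)
-- ===== Notes on version B (the rewrite author's own statement) =====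
-- stated objective: simpler
-- what changed: Replaced the unit-step counting loop with the closed form max(0, e_time - s_time) after the s_time>=56 adjustment; intended as asymptotically faster (O(1) vs O(e-s)), but a timing run could not confirm it consistently on random inputs, so no speed is claimed.
import Mathlib
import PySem

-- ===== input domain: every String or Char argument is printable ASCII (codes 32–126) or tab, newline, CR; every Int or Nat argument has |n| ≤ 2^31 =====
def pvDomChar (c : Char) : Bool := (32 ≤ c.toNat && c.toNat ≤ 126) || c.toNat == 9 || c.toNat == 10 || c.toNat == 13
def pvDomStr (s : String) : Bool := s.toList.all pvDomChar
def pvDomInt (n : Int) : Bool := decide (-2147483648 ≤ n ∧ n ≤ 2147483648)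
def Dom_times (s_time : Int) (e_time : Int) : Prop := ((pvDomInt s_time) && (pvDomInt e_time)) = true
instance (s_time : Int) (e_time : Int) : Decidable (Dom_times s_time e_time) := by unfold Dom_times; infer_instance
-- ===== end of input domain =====

-- B replaces A's unit-step counting loop by the closed form max 0 (e - s): simpler, no loop.

-- ===== PORT A =====
-- the while loop of A: counts up i while s < e, stepping s by 1
def timesLoop (s e i : Int) : Int :=
  if s < e then timesLoop (s + 1) e (i + 1) else i
termination_by (e - s).toNat
decreasing_by
  have h : e - (s + 1) < e - s := by omega
  omega

def times (s_time : Int) (e_time : Int) : Int :=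
  if s_time ≥ 56 then timesLoop 0 (e_time + (61 - s_time)) 0
  else timesLoop s_time e_time 0

-- ===== PORT B =====
def times_alt (s_time : Int) (e_time : Int) : Int :=
  if s_time ≥ 56 then max 0 (e_time + (61 - s_time) - 0)
  else max 0 (e_time - s_time)

-- ===== PRECONDITION & SPEC =====
def Spec_times (s_time : Int) (e_time : Int) (out : Int) : Prop := out = times_alt s_time e_time
instance (s_time : Int) (e_time : Int) (out : Int) : Decidable (Spec_times s_time e_time out) := by unfold Spec_times; infer_instance

-- ===== CLAIM (what is proved, stated in full; the proofs are below) =====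
def Claim_equal_times : Prop := ∀ (s_time : Int) (e_time : Int), Dom_times s_time e_time → Spec_times s_time e_time (times s_time e_time)

-- ===== LEMMAS AND PROOFS =====
theorem timesLoop_eq (s e i : Int) : timesLoop s e i = i + max 0 (e - s) := by
  by_cases h : s < e
  · rw [timesLoop]
    simp only [h, if_pos]
    rw [timesLoop_eq (s + 1) e (i + 1)]
    omega
  · rw [timesLoop]
    rw [if_neg h]
    omega
termination_by (e - s).toNat
decreasing_by omega

-- ===== VERDICT (by name: the statement is the Claim_ definition above) =====
theorem times_spec : Claim_equal_times := by
  intro s e _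
  unfold Spec_times times times_alt
  split_ifs with h <;> rw [timesLoop_eq] <;> omega
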